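-- pv_equiv track=rewrite | github.com/harishhirthi/LaMoE | lamoe/tokenizer.py | create_word_freq_dict
-- ===== SOURCE A (Python) =====
-- import collections
--
-- def create_word_freq_dict(Text: list) -> tuple[dict, dict]:
--     word_freq = collections.defaultdict(int) # Computes count of each individual words.
--     for text in Text:
--         new_words = text.split()
--         for word in new_words:
--             word = " ".join(word.strip()) + " </w>" # Creates space between characters of word. </w> indicates the end of word.
--             word_freq[word] += 1
--
--     """Creates a vocabulary of individual characters along with count"""
--     vocab_count_dic = collections.defaultdict(int)
--
--     for word, freq in word_freq.items():
--         for letter in word.split():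
--                 vocab_count_dic[letter] += freq
--
--     return word_freq, vocab_count_dic
-- ===== SOURCE B (Python) =====
-- import collections
--
-- def create_word_freq_dict(Text: list) -> tuple[dict, dict]:
--     # Staged pipeline: first flatten the corpus into the list of spaced-key
--     # occurrences, then into the list of letter occurrences, and count each
--     # flat list with collections.Counter (wrapped back into defaultdict(int)).
--     keys = [" ".join(w.strip()) + " </w>" for text in Text for w in text.split()]
--     letters = [letter for k in keys for letter in k.split()]
--     word_freq = collections.defaultdict(int, collections.Counter(keys))
--     vocab_count_dic = collections.defaultdict(int, collections.Counter(letters))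
--     return word_freq, vocab_count_dic
-- ===== Notes on version B (the rewrite author's own statement) =====
-- stated objective: alternative
-- what changed: B replaces A's nested in-place counting loops (and A's second traversal over the aggregated word_freq.items(), which adds freq per unique word) by a staged pipeline: flatten the corpus into the flat list of spaced-key occurrences, flatten that into the flat list of letter occurrences, and count each flat list once with collections.Counter.
import Mathlib
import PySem

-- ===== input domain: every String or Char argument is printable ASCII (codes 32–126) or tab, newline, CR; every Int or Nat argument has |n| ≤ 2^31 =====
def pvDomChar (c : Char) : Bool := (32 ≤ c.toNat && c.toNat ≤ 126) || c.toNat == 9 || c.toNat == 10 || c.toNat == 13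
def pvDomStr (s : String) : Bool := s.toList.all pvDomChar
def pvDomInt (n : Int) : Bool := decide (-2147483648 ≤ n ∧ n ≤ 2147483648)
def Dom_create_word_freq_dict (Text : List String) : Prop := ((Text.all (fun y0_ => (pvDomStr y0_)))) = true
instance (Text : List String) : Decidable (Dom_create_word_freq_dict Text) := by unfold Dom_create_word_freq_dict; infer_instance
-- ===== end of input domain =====

-- B replaces A's nested in-place counting loops and second item traversal by a staged
-- flatten-then-count pipeline (Counter over flat occurrence lists); same values, no speed claim.

-- ===== PORT A =====
-- key helper shared by both ports: both Pythons compute the same expression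
-- " ".join(word.strip()) + " </w>"  (join over the characters of the stripped word)
def pvKey (word : String) : String :=
  String.mk (PySem.Chars.join [' ']
      (((PySem.Str.strip word).toList).map (fun c => [c])) ++ " </w>".toList)

def create_word_freq_dict (Text : List String) :
    (List (String × Int)) × (List (String × Int)) :=
  let word_freq : PySem.Dict String Int :=
    Text.foldl (fun d text =>
      (PySem.Str.split₀ text).foldl (fun d word =>
        d.modify (pvKey word) 0 (· + 1)) d) PySem.Dict.empty
  let vocab_count_dic : PySem.Dict String Int :=
    word_freq.items.foldl (fun d p =>
      (PySem.Str.split₀ p.1).foldl (fun d letter =>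
        d.modify letter 0 (· + p.2)) d) PySem.Dict.empty
  (word_freq.items, vocab_count_dic.items)

-- ===== PORT B =====
def create_word_freq_dict_alt (Text : List String) :
    (List (String × Int)) × (List (String × Int)) :=
  let keys := Text.flatMap (fun text => (PySem.Str.split₀ text).map (fun w => pvKey w))
  let letters := keys.flatMap (fun k => PySem.Str.split₀ k)
  ((PySem.Dict.counter keys).items, (PySem.Dict.counter letters).items)

-- ===== PRECONDITION & SPEC =====
def Spec_create_word_freq_dict (Text : List String) (out : (List (String × Int)) × (List (String × Int))) : Prop := out = create_word_freq_dict_alt Text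
instance (Text : List String) (out : (List (String × Int)) × (List (String × Int))) : Decidable (Spec_create_word_freq_dict Text out) := by unfold Spec_create_word_freq_dict; infer_instance

-- ===== CLAIM (what is proved, stated in full; the proofs are below) =====
def Claim_equal_create_word_freq_dict : Prop := ∀ (Text : List String), Dom_create_word_freq_dict Text → Spec_create_word_freq_dict Text (create_word_freq_dict Text)

-- ===== LEMMAS AND PROOFS =====

-- all key occurrences, in order (B's `keys` list)
def pvW (Text : List String) : List String :=
  (Text.flatMap (fun t => PySem.Str.split₀ t)).map pvKey

-- all letter occurrences, in order (B's `letters` list)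
def pvLetters (Text : List String) : List String :=
  (pvW Text).flatMap (fun k => PySem.Str.split₀ k)

-- "d[x] += v" loop over a list of (key, amount) pairs
def pvWadd (ps : List (String × Int)) : PySem.Dict String Int :=
  ps.foldl (fun d p => d.modify p.1 0 (· + p.2)) PySem.Dict.empty

-- A's second loop, flattened to (letter, freq) pairs
def pvPA (Text : List String) : List (String × Int) :=
  (PySem.Set.ofList (pvW Text)).flatMap (fun k =>
    (PySem.Str.split₀ k).map (fun l => (l, ((pvW Text).count k : Int))))

lemma pv_update_eq {α : Type} [BEq α] (s : PySem.Set α) (xs : List α) :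
    PySem.Set.update s xs = xs.foldl PySem.Set.add s := rfl

lemma pv_add_of_mem {α : Type} [BEq α] [LawfulBEq α] (s : PySem.Set α) (x : α)
    (h : x ∈ s) : PySem.Set.add s x = s := by
  simp [PySem.Set.add, PySem.Set.contains, h]

lemma pv_update_subset {α : Type} [BEq α] [LawfulBEq α] (xs : List α) (s : PySem.Set α)
    (h : ∀ x ∈ xs, x ∈ s) : PySem.Set.update s xs = s := by
  induction xs generalizing s with
  | nil => rfl
  | cons x t ih =>
    rw [pv_update_eq, List.foldl_cons, pv_add_of_mem s x (h x (by simp)),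
      ← pv_update_eq, ih s (fun y hy => h y (by simp [hy]))]

lemma pv_ofList_append {α : Type} [BEq α] (a b : List α) :
    PySem.Set.ofList (a ++ b) = PySem.Set.update (PySem.Set.ofList a) b := by
  simp [PySem.Set.ofList_eq_foldl, List.foldl_append, pv_update_eq]

lemma pv_ofList_flatMap (K : List String) (f : String → List String) :
    PySem.Set.ofList ((PySem.Set.ofList K).flatMap f) = PySem.Set.ofList (K.flatMap f) := by
  induction K using List.reverseRecOn with
  | nil => rfl
  | append_singleton K k ih =>
    have hof : PySem.Set.ofList (K ++ [k]) = PySem.Set.add (PySem.Set.ofList K) k := by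
      simp [PySem.Set.ofList_eq_foldl, List.foldl_append]
    have hrhs : PySem.Set.ofList ((K ++ [k]).flatMap f)
        = PySem.Set.update (PySem.Set.ofList (K.flatMap f)) (f k) := by
      simp [List.flatMap_append, pv_ofList_append]
    by_cases h : k ∈ K
    · rw [hof, pv_add_of_mem _ _ ((PySem.Set.mem_ofList K k).mpr h), ih, hrhs,
        pv_update_subset]
      intro x hx
      exact (PySem.Set.mem_ofList _ _).mpr (List.mem_flatMap.mpr ⟨k, h, hx⟩)
    · have hadd : PySem.Set.add (PySem.Set.ofList K) k = PySem.Set.ofList K ++ [k] := by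
        have : k ∉ PySem.Set.ofList K := fun hc => h ((PySem.Set.mem_ofList K k).mp hc)
        simp [PySem.Set.add, PySem.Set.contains, this]
      rw [hof, hadd, hrhs, List.flatMap_append, pv_ofList_append, ih]
      simp

lemma pvWadd_getD (ps : List (String × Int)) (d : PySem.Dict String Int) (x : String) :
    (ps.foldl (fun d p => d.modify p.1 0 (· + p.2)) d).getD x 0
      = d.getD x 0 + ((ps.filter (fun p => p.1 == x)).map Prod.snd).sum := by
  induction ps generalizing d with
  | nil => simp
  | cons p t ih =>
    rw [List.foldl_cons, ih, List.filter_cons]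
    by_cases h : p.1 = x
    · simp only [h, beq_self_eq_true, if_pos, List.map_cons, List.sum_cons,
        PySem.Dict.getD_modify]
      ring
    · have hb : (p.1 == x) = false := by simp [h]
      simp only [hb, if_neg, Bool.false_eq_true, not_false_iff,
        PySem.Dict.getD_modify]
      rw [if_neg (fun hc => h hc.symm)]

lemma pvWadd_keys (ps : List (String × Int)) :
    (pvWadd ps).keys = PySem.Set.ofList (ps.map Prod.fst) := by
  have h := PySem.Dict.keys_foldl_modify_key ps Prod.fst (0 : Int)
    (fun _ p v => v + p.2) PySem.Dict.empty
  simpa [pvWadd, PySem.Dict.keys_empty, pv_update_eq, PySem.Set.ofList_eq_foldl] using h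

lemma pvWadd_nodup_keys (ps : List (String × Int)) : (pvWadd ps).keys.Nodup :=
  PySem.Dict.nodup_keys_foldl_modify_key ps Prod.fst (0 : Int)
    (fun _ p v => v + p.2) PySem.Dict.empty PySem.Dict.nodup_keys_empty

lemma pvWadd_ext (ps qs : List (String × Int))
    (hk : PySem.Set.ofList (ps.map Prod.fst) = PySem.Set.ofList (qs.map Prod.fst))
    (hs : ∀ x, ((ps.filter (fun p => p.1 == x)).map Prod.snd).sum
        = ((qs.filter (fun p => p.1 == x)).map Prod.snd).sum) :
    pvWadd ps = pvWadd qs := by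
  apply PySem.Dict.ext
  rw [PySem.Dict.items_eq_map_keys _ (pvWadd_nodup_keys ps) 0,
     PySem.Dict.items_eq_map_keys _ (pvWadd_nodup_keys qs) 0,
     pvWadd_keys, pvWadd_keys, hk]
  apply List.map_congr_left
  intro k _
  have h1 := pvWadd_getD ps PySem.Dict.empty k
  have h2 := pvWadd_getD qs PySem.Dict.empty k
  simp only [PySem.Dict.getD_empty, zero_add] at h1 h2
  show (k, (pvWadd ps).getD k 0) = (k, (pvWadd qs).getD k 0)
  rw [show (pvWadd ps).getD k 0 = _ from h1, show (pvWadd qs).getD k 0 = _ from h2, hs k]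

-- sum of a projection over a filtered flatMap, per source element
lemma pv_fsum {α : Type} (l : List α) (F : α → List (String × Int))
    (p : String × Int → Bool) :
    (((l.flatMap F).filter p).map Prod.snd).sum
      = (l.map (fun a => (((F a).filter p).map Prod.snd).sum)).sum := by
  induction l with
  | nil => simp
  | cons a t ih => simp [List.flatMap_cons, List.filter_append, ih]

-- summing g weighted by multiplicity over the distinct elements = summing g over all occurrences
lemma pv_weighted (K : List String) (g : String → Nat) :
    ((PySem.Set.ofList K).map (fun k => ((g k : Int)) * (K.count k : Int))).sum
      = ((K.map g).sum : Int) := by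
  have h1 : (PySem.Set.ofList K).toFinset = K.toFinset := by
    apply Finset.ext
    intro a
    simp [List.mem_toFinset, PySem.Set.mem_ofList]
  rw [← List.sum_toFinset _ (PySem.Set.nodup_ofList K), h1]
  have h2 := Finset.sum_multiset_map_count (↑K : Multiset String)
    (fun k => ((g k : Int)))
  simp only [Multiset.coe_count, Multiset.map_coe, Multiset.sum_coe,
    nsmul_eq_mul] at h2
  have h3 : ((↑K : Multiset String)).toFinset = K.toFinset := rfl
  rw [h3] at h2
  rw [Nat.cast_list_sum, List.map_map,
    show (Nat.cast ∘ g : String → Int) = (fun k => ((g k : Int))) from rfl, h2]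
  apply Finset.sum_congr rfl
  intro k _
  ring

-- A's word_freq loop is Counter over the key occurrences
lemma pv_wf (Text : List String) :
    Text.foldl (fun d text =>
      (PySem.Str.split₀ text).foldl (fun d word =>
        d.modify (pvKey word) 0 (· + 1)) d) PySem.Dict.empty
    = PySem.Dict.counter (pvW Text) := by
  rw [PySem.Dict.counter_eq_foldl, pvW, List.foldl_map, List.foldl_flatMap]

-- A's vocab loop is the weighted-add loop over pvPA
lemma pv_vocabA (Text : List String) :
    (PySem.Dict.counter (pvW Text)).items.foldl (fun d p =>
      (PySem.Str.split₀ p.1).foldl (fun d letter =>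
        d.modify letter 0 (· + p.2)) d) PySem.Dict.empty
    = pvWadd (pvPA Text) := by
  rw [PySem.Dict.items_counter, List.foldl_map, pvWadd, pvPA, List.foldl_flatMap]
  apply PySem.List.foldl_congr_mem
  intro d k _
  rw [List.foldl_map]

lemma pvA_eq (Text : List String) :
    create_word_freq_dict Text
      = ((PySem.Dict.counter (pvW Text)).items, (pvWadd (pvPA Text)).items) := by
  show (_, _) = _
  rw [pv_wf, pv_vocabA]

-- B's `keys` list is pvW and its `letters` list is pvLetters (pure list algebra)
lemma pvB_eq (Text : List String) :
    create_word_freq_dict_alt Text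
      = ((PySem.Dict.counter (pvW Text)).items,
         (PySem.Dict.counter (pvLetters Text)).items) := by
  unfold create_word_freq_dict_alt pvLetters pvW
  rw [List.map_flatMap]

lemma pv_counter_as_wadd (L : List String) :
    PySem.Dict.counter L = pvWadd (L.map (fun l => (l, (1 : Int)))) := by
  rw [pvWadd, List.foldl_map, PySem.Dict.counter_eq_foldl]

lemma pv_main (Text : List String) :
    pvWadd (pvPA Text) = PySem.Dict.counter (pvLetters Text) := by
  rw [pv_counter_as_wadd]
  apply pvWadd_ext
  · simp only [pvPA, List.map_flatMap, List.map_map, Function.comp_def,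
      List.map_id']
    rw [pv_ofList_flatMap]
    rfl
  · intro x
    rw [pvPA, pv_fsum]
    have hq : (((((pvLetters Text).map (fun l => (l, (1 : Int)))).filter
        (fun p => p.1 == x)).map Prod.snd).sum) = ((pvLetters Text).count x : Int) := by
      rw [List.filter_map, List.map_map]
      simp only [Function.comp_def]
      rw [PySem.List.sum_map_const_int, ← List.countP_eq_length_filter,
        ← List.count_eq_countP, mul_one]
    rw [hq]
    have hp : ∀ k : String,
        ((((PySem.Str.split₀ k).map (fun l => (l, ((pvW Text).count k : Int)))).filter
          (fun p => p.1 == x)).map Prod.snd).sum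
        = (((PySem.Str.split₀ k).count x : Int)) * ((pvW Text).count k : Int) := by
      intro k
      rw [List.filter_map, List.map_map]
      simp only [Function.comp_def]
      rw [PySem.List.sum_map_const_int, ← List.countP_eq_length_filter,
        ← List.count_eq_countP]
    rw [List.map_congr_left (fun k _ => hp k),
      pv_weighted (pvW Text) (fun k => (PySem.Str.split₀ k).count x),
      pvLetters, List.count_flatMap]
    rfl

-- ===== VERDICT (by name: the statement is the Claim_ definition above) =====
theorem create_word_freq_dict_spec : Claim_equal_create_word_freq_dict := by
  intro Text _
  unfold Spec_create_word_freq_dict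
  rw [pvA_eq, pvB_eq, pv_main]
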